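-- pv_equiv track=rewrite | github.com/abusaeed2433/AllCode | C/tttttt.py | calc
-- ===== SOURCE A (Python) =====
-- from collections import defaultdict
--
-- def calc(n):
--     d=defaultdict(int)
--     d[0]=1
--     ans=1
--     for i in range(2,n):
--         d[i-1] = 1+d[(n%i)-1]
--         ans+=d[i-1]
--     return ans
-- ===== SOURCE B (Python) =====
-- def calc(n):
--     # On-demand recursion down the chain i -> n % i instead of the forward dict DP.
--     def val(i):
--         r = n % i
--         if r == 0:
--             return 1
--         if r == 1:
--             return 2
--         return 1 + val(r)
--     return 1 + sum(val(i) for i in range(2, n))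
-- ===== Notes on version B (the rewrite author's own statement) =====
-- stated objective: alternative
-- what changed: Replaces the forward dict DP (which fills d[i-1] for every i and relies on the defaultdict's implicit zero at key minus-one) by a direct recursion down the chain i -> n mod i, summed over the same range, with no dictionary at all.
import Mathlib
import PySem

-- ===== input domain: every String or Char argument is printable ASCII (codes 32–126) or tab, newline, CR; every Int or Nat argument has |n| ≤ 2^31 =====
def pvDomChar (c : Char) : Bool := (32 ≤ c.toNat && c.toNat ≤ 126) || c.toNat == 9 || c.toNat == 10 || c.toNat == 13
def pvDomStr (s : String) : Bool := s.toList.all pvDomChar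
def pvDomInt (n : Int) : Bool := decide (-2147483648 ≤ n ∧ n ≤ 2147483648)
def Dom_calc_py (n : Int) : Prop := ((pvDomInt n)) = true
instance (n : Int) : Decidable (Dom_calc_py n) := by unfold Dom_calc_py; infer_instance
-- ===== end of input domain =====

-- B replaces A's forward dict DP by a direct recursion down the chain i → n % i (no dictionary); same values, similar cost.

-- ===== PORT A =====
-- loop body of A's 'for i in range(2, n)': d[i-1] = 1 + d[(n%i)-1]; ans += d[i-1]
-- (the local defaultdict is modelled by Std.HashMap with the read 'd[(n%i)-1]' as getD
--  with default 0: exact for the returned value, since d is only read via these keys,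
--  never iterated or returned)
def pvStepA (n : Int) (st : Std.HashMap Int Int × Int) (i : Int) : Std.HashMap Int Int × Int :=
  let v := 1 + st.1.getD (PySem.Int.mod n i - 1) 0
  let d := st.1.insert (i - 1) v
  (d, st.2 + d.getD (i - 1) 0)

def calc_py (n : Int) : Int :=
  ((PySem.List.pyRange 2 n 1).foldl (pvStepA n) (((∅ : Std.HashMap Int Int).insert 0 1), 1)).2

-- ===== PORT B =====
-- B's recursive helper val(i); only ever called with i ≥ 2, where 0 ≤ n%i < i.
-- The 'if h : … else 1' branch is a totality guard only (never taken for i ≥ 2).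
def calcVal (n : Int) (i : Nat) : Int :=
  let r := PySem.Int.mod n (i : Int)
  if r = 0 then 1
  else if r = 1 then 2
  else if h : r.toNat < i then 1 + calcVal n r.toNat
  else 1
termination_by i

-- 'sum(val(i) for i in range(2, n))' as a left fold accumulation
def calc_py_alt (n : Int) : Int :=
  1 + (PySem.List.pyRange 2 n 1).foldl (fun acc i => acc + calcVal n i.toNat) 0

-- ===== PRECONDITION & SPEC =====
def Spec_calc_py (n : Int) (out : Int) : Prop := out = calc_py_alt n
instance (n : Int) (out : Int) : Decidable (Spec_calc_py n out) := by unfold Spec_calc_py; infer_instance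

-- ===== CLAIM (what is proved, stated in full; the proofs are below) =====
def Claim_equal_calc_py : Prop := ∀ (n : Int), Dom_calc_py n → Spec_calc_py n (calc_py n)

-- ===== LEMMAS AND PROOFS =====

theorem pvFoldSum (f : Int → Int) (l : List Int) (s : Int) :
    l.foldl (fun acc i => acc + f i) s = s + (l.map f).sum := by
  induction l generalizing s with
  | nil => simp
  | cons x xs ih => simp [ih, add_assoc]

theorem hmGetD_insert (d : Std.HashMap Int Int) (k a v f : Int) :
    (d.insert k v).getD a f = if a = k then v else d.getD a f := by
  by_cases h : a = k
  · simp [h]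
  · rw [if_neg h, Std.HashMap.getD_insert, if_neg (by simpa using fun hh => h hh.symm)]

-- Int-indexed view of calcVal
def calcValI (n i : Int) : Int := calcVal n i.toNat

theorem calcValI_eq (n i : Int) (h2 : 2 ≤ i) :
    calcValI n i =
      if PySem.Int.mod n i = 0 then 1
      else if PySem.Int.mod n i = 1 then 2
      else 1 + calcValI n (PySem.Int.mod n i) := by
  have hi : ((i.toNat : Int)) = i := Int.toNat_of_nonneg (by omega)
  have hpos : (0:Int) < i := by omega
  unfold calcValI
  rw [calcVal]
  simp only [hi]
  have hr0 : 0 ≤ PySem.Int.mod n i := PySem.Int.mod_nonneg n hpos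
  have hr1 : PySem.Int.mod n i < i := PySem.Int.mod_lt n hpos
  by_cases h0 : PySem.Int.mod n i = 0
  · simp [h0]
  · by_cases h1 : PySem.Int.mod n i = 1
    · simp [h1]
    · have hlt : (PySem.Int.mod n i).toNat < i.toNat := by omega
      simp [h0, h1, hlt]

theorem pvInv (n : Int) (k : Nat) :
    (∀ j : Int,
      (((PySem.List.pyRange 2 (2 + (k:Int)) 1).foldl (pvStepA n)
        (((∅ : Std.HashMap Int Int).insert 0 1), 1)).1).getD j 0 =
        if j = 0 then 1 else if 1 ≤ j ∧ j < 1 + (k:Int) then calcValI n (j + 1) else 0)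
    ∧ ((PySem.List.pyRange 2 (2 + (k:Int)) 1).foldl (pvStepA n)
        (((∅ : Std.HashMap Int Int).insert 0 1), 1)).2 =
        1 + ((PySem.List.pyRange 2 (2 + (k:Int)) 1).map (fun i => calcValI n i)).sum := by
  induction k with
  | zero =>
    rw [show ((2:Int) + (0:Nat) = 2) by norm_num, PySem.List.pyRange_one_eq_nil (by omega)]
    constructor
    · intro j
      simp only [List.foldl_nil]
      rw [hmGetD_insert]
      split_ifs with h h' <;> simp <;> omega
    · simp
  | succ k ih =>
    have hsplit : (2 : Int) + ((k:Nat)+1 : Nat) = (2 + (k:Int)) + 1 := by push_cast; ring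
    rw [hsplit, PySem.List.pyRange_one_succ_right (by omega)]
    simp only [List.foldl_append, List.foldl_cons, List.foldl_nil, List.map_append,
      List.map_cons, List.map_nil, List.sum_append, List.sum_cons, List.sum_nil]
    obtain ⟨ihd, iha⟩ := ih
    set st := (PySem.List.pyRange 2 (2 + (k:Int)) 1).foldl (pvStepA n)
        (((∅ : Std.HashMap Int Int).insert 0 1), 1) with hst
    have hipos : (0:Int) < 2 + (k:Int) := by omega
    have hr0 : 0 ≤ PySem.Int.mod n (2 + (k:Int)) := PySem.Int.mod_nonneg n hipos
    have hr1 : PySem.Int.mod n (2 + (k:Int)) < 2 + (k:Int) := PySem.Int.mod_lt n hipos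
    -- the value written at this step equals calcValI n (2+k)
    have hv : 1 + st.1.getD (PySem.Int.mod n (2 + (k:Int)) - 1) 0 = calcValI n (2 + (k:Int)) := by
      rw [ihd, calcValI_eq n (2 + (k:Int)) (by omega)]
      by_cases h0 : PySem.Int.mod n (2 + (k:Int)) = 0
      · simp [h0]
      · by_cases h1 : PySem.Int.mod n (2 + (k:Int)) = 1
        · simp [h1]
        · have : ¬ (PySem.Int.mod n (2 + (k:Int)) - 1 = 0) := by omega
          rw [if_neg this, if_pos (by omega), if_neg h0, if_neg h1]
          have : PySem.Int.mod n (2 + (k:Int)) - 1 + 1 = PySem.Int.mod n (2 + (k:Int)) := by ring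
          rw [this]
    constructor
    · intro j
      show ((st.1.insert (2 + (k:Int) - 1) _).getD j 0) = _
      rw [hmGetD_insert]
      by_cases hj : j = 2 + (k:Int) - 1
      · rw [if_pos hj, hv, if_neg (by omega), if_pos (by constructor <;> omega)]
        congr 1; omega
      · rw [if_neg hj, ihd]
        split_ifs with h h' h'' <;> first | rfl | omega
    · show st.2 + ((st.1.insert (2 + (k:Int) - 1) _).getD (2 + (k:Int) - 1) 0) = _
      rw [hmGetD_insert, if_pos rfl, hv, iha]
      ring

-- ===== VERDICT (by name: the statement is the Claim_ definition above) =====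
theorem calc_py_spec : Claim_equal_calc_py := by
  intro n _
  show calc_py n = calc_py_alt n
  unfold calc_py calc_py_alt
  by_cases hn : n ≤ 2
  · rw [PySem.List.pyRange_one_eq_nil hn]; rfl

  · have hk : n = 2 + (((n - 2).toNat : Nat) : Int) := by omega
    have h := (pvInv n (n - 2).toNat).2
    rw [← hk] at h
    rw [h, pvFoldSum]
    simp [calcValI]
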